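-- pv_equiv track=rewrite | github.com/TridipKarmakar/Python_Assingment_IITM_Updated | week 8/8. OPPE_1_MAY_24_-_Set_1 and 2.py | is_all_same_word_twice
-- ===== SOURCE A (Python) =====
-- def is_all_same_word_twice(strings: list) -> bool:
--     '''
--     Checks if all strings follow the format where
--     the same word is repeated exactly twice with a hyphen in-between them.
--
--     Args:
--         strings (list): A list of strings to be checked.
--
--     Returns:
--         bool: True if all strings are of the given format, otherwise False.
--     '''
--     ...
--
--
--     for string in strings:
--         # Check if the string contains exactly one hyphen
--         if string.count("-") != 1:
--             return False
--
--         # Split the string into two parts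
--         before_string, after_string = string.split("-")
--
--         # Check if the word is repeated and not empty
--         if before_string != after_string or not before_string:
--             return False
--     return True
-- ===== SOURCE B (Python) =====
-- def _is_word_twice(s: str) -> bool:
--     half, odd = divmod(len(s), 2)
--     return (odd == 1 and half > 0 and s[half] == '-'
--             and '-' not in s[:half] and s[:half] == s[half + 1:])
--
--
-- def is_all_same_word_twice(strings: list) -> bool:
--     return all(_is_word_twice(s) for s in strings)
-- ===== Notes on version B (the rewrite author's own statement) =====
-- stated objective: alternative
-- what changed: Replaces A's count('-')/split('-')/compare pipeline with an arithmetic shape test per string: the length must be odd with an odd middle hyphen, no hyphen in the first half, and the two halves equal by slice comparison.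
import Mathlib
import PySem

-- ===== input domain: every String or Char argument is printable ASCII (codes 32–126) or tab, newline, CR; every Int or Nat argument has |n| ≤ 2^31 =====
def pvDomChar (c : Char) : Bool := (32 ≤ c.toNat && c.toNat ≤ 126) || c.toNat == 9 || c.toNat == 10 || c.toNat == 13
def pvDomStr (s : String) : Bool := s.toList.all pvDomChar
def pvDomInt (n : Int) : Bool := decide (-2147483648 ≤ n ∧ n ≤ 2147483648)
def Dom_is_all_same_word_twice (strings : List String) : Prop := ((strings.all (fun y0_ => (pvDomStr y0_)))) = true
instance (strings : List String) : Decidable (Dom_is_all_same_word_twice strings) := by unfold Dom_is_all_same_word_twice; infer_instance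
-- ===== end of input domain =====

-- B replaces A's count/split/compare pipeline with a per-string length-parity and
-- middle-hyphen check comparing the two halves by slicing (alternative algorithm, similar cost).


-- ===== PORT A =====
-- for string in strings: count("-") != 1 → False; split("-") into two parts; unequal or empty → False
def is_all_same_word_twice : List String → Bool
  | [] => true
  | s :: rest =>
    if PySem.Str.count s "-" ≠ 1 then false
    else
      match PySem.Str.split? s "-" with
      | some [before_string, after_string] =>
        if before_string != after_string || before_string == "" then false
        else is_all_same_word_twice rest
      | _ => false   -- unreachable: with count = 1 the split has exactly two parts

-- ===== PORT B =====
-- half, odd = divmod(len(s), 2); len(s) ≥ 0, so Nat '/' and '%' are exactly Python's divmod here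
def pvIsWordTwice (s : String) : Bool :=
  let cs := s.toList
  let half := cs.length / 2
  let odd := cs.length % 2
  odd == 1 && decide (0 < half) &&
  PySem.List.pyGet? cs (half : Int) == some '-' &&
  !(PySem.Chars.isIn ['-'] (PySem.List.slice cs none (some (half : Int)))) &&
  PySem.List.slice cs none (some (half : Int)) == PySem.List.slice cs (some ((half : Int) + 1)) none

def is_all_same_word_twice_alt (strings : List String) : Bool :=
  strings.all pvIsWordTwice

-- ===== PRECONDITION & SPEC =====
def Spec_is_all_same_word_twice (strings : List String) (out : Bool) : Prop := out = is_all_same_word_twice_alt strings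
instance (strings : List String) (out : Bool) : Decidable (Spec_is_all_same_word_twice strings out) := by unfold Spec_is_all_same_word_twice; infer_instance

-- ===== CLAIM (what is proved, stated in full; the proofs are below) =====
def Claim_equal_is_all_same_word_twice : Prop := ∀ (strings : List String), Dom_is_all_same_word_twice strings → Spec_is_all_same_word_twice strings (is_all_same_word_twice strings)

-- ===== LEMMAS AND PROOFS =====

-- the common semantic content: s is one hyphen-free nonempty word repeated twice around a hyphen
def pvGood (cs : List Char) : Prop := ∃ w, w ≠ [] ∧ '-' ∉ w ∧ cs = w ++ '-' :: w

lemma pvCountGo (cs : List Char) (fuel acc : Nat) (hf : cs.length ≤ fuel) :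
    PySem.Chars.count.go ['-'] fuel cs acc = acc + cs.count '-' := by
  induction cs generalizing fuel acc with
  | nil => cases fuel <;> simp [PySem.Chars.count.go]
  | cons h t ih =>
    cases fuel with
    | zero => simp at hf
    | succ f =>
      have hpre : List.isPrefixOf ['-'] (h :: t) = ('-' == h) := by
        simp [List.isPrefixOf]
      rw [PySem.Chars.count.go, hpre]
      by_cases hh : '-' = h
      · rw [if_pos (beq_iff_eq.mpr hh)]
        simp only [List.length_singleton, List.drop_succ_cons, List.drop_zero]
        rw [ih f (acc + 1) (by simp at hf ⊢; omega)]
        subst hh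
        simp [List.count_cons]
        omega
      · rw [if_neg (by simp [hh])]
        rw [ih f acc (by simp at hf ⊢; omega)]
        simp [List.count_cons, Ne.symm hh]

lemma pvSplitGoFree (cs : List Char) (fuel : Nat) (cur : List Char) (acc : List (List Char))
    (hf : cs.length ≤ fuel) (hfree : '-' ∉ cs) :
    PySem.Chars.splitOn.go ['-'] fuel cs cur acc = acc.reverse ++ [cur.reverse ++ cs] := by
  induction cs generalizing fuel cur acc with
  | nil => cases fuel <;> simp [PySem.Chars.splitOn.go]
  | cons h t ih =>
    cases fuel with
    | zero => simp at hf
    | succ f =>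
      have hh : ¬ ('-' = h) := by simp at hfree; tauto
      rw [PySem.Chars.splitOn.go]
      rw [if_neg (by simp [List.isPrefixOf, hh])]
      rw [ih f (h :: cur) acc (by simp at hf ⊢; omega) (by simp at hfree; tauto)]
      simp

lemma pvSplitGoHyphen (xs ys : List Char) (fuel : Nat) (cur : List Char) (acc : List (List Char))
    (hf : (xs ++ '-' :: ys).length ≤ fuel) (hx : '-' ∉ xs) (hy : '-' ∉ ys) :
    PySem.Chars.splitOn.go ['-'] fuel (xs ++ '-' :: ys) cur acc
      = acc.reverse ++ [cur.reverse ++ xs, ys] := by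
  induction xs generalizing fuel cur acc with
  | nil =>
    cases fuel with
    | zero => simp at hf
    | succ f =>
      rw [List.nil_append, PySem.Chars.splitOn.go]
      rw [if_pos (by simp [List.isPrefixOf])]
      simp only [List.length_cons, List.nil_append] at hf
      simp only [List.length_singleton, List.drop_succ_cons, List.drop_zero]
      rw [pvSplitGoFree ys f [] (cur.reverse :: acc) (by simp at hf ⊢; omega) hy]
      simp
  | cons h t ih =>
    cases fuel with
    | zero => simp at hf
    | succ f =>
      have hh : ¬ ('-' = h) := by simp at hx; tauto
      simp only [List.cons_append]
      rw [PySem.Chars.splitOn.go]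
      rw [if_neg (by simp [List.isPrefixOf, hh])]
      rw [ih f (h :: cur) acc (by simp at hf ⊢; omega) (by simp at hx; tauto)]
      simp

lemma pvDecomp (cs : List Char) (h1 : cs.count '-' = 1) :
    ∃ xs ys, cs = xs ++ '-' :: ys ∧ '-' ∉ xs ∧ '-' ∉ ys := by
  induction cs with
  | nil => simp at h1
  | cons h t ih =>
    by_cases hh : '-' = h
    · subst hh
      refine ⟨[], t, rfl, by simp, ?_⟩
      simp [List.count_cons] at h1
      intro hm
      have := List.count_pos_iff.mpr hm
      omega
    · rw [List.count_cons_of_ne (Ne.symm hh)] at h1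
      obtain ⟨xs, ys, hxy, hx, hy⟩ := ih h1
      exact ⟨h :: xs, ys, by simp [hxy], by simp [hx]; exact fun e => hh e, hy⟩

lemma pvAltIff (s : String) : pvIsWordTwice s = true ↔ pvGood s.toList := by
  unfold pvIsWordTwice pvGood
  set cs := s.toList with hcs
  simp only []
  rw [PySem.List.slice_to cs (by positivity)]
  have h1 : ((cs.length / 2 : Nat) : Int) + 1 = ((cs.length / 2 + 1 : Nat) : Int) := by push_cast; ring
  rw [h1, PySem.List.slice_from cs (by positivity)]
  simp only [Int.toNat_natCast, PySem.List.pyGet?_natCast]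
  constructor
  · intro hb
    simp only [Bool.and_eq_true, beq_iff_eq, decide_eq_true_eq, Bool.not_eq_true',
      PySem.Chars.isIn_eq_false_iff, List.singleton_infix_iff] at hb
    obtain ⟨⟨⟨⟨hodd, hpos⟩, hmid⟩, hfree⟩, heq⟩ := hb
    set h := cs.length / 2 with hh
    refine ⟨cs.take h, ?_, hfree, ?_⟩
    · have : h < cs.length := by omega
      intro hnil
      rcases List.take_eq_nil_iff.mp hnil with h0 | h0
      · omega
      · rw [h0] at this; simp at this
    · have hlt : h < cs.length := by omega
      have hdrop : cs.drop h = cs[h] :: cs.drop (h + 1) := List.drop_eq_getElem_cons hlt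
      have hget : cs[h] = '-' := by
        have := List.getElem?_eq_getElem hlt
        rw [this] at hmid
        exact Option.some_injective _ hmid
      calc cs = cs.take h ++ cs.drop h := (List.take_append_drop h cs).symm
        _ = cs.take h ++ '-' :: cs.drop (h+1) := by rw [hdrop, hget]
        _ = cs.take h ++ '-' :: cs.take h := by rw [← heq]
  · rintro ⟨w, hne, hfree, hw⟩
    have hk : 0 < w.length := List.length_pos_of_ne_nil hne
    have hlen : cs.length = 2 * w.length + 1 := by rw [hw]; simp; omega
    have hhalf : cs.length / 2 = w.length := by omega
    simp only [Bool.and_eq_true, beq_iff_eq, decide_eq_true_eq, Bool.not_eq_true',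
      PySem.Chars.isIn_eq_false_iff, List.singleton_infix_iff, hhalf]
    have htake : cs.take w.length = w := by
      rw [hw, List.take_append_of_le_length le_rfl, List.take_length]
    have hdrop : cs.drop (w.length + 1) = w := by
      rw [hw]
      have h2 : w.length + 1 = w.length + 1 := rfl
      calc (w ++ '-' :: w).drop (w.length + 1) = ('-' :: w).drop 1 := by
            simpa using List.drop_append (l₁ := w) (l₂ := '-' :: w) (i := 1)
        _ = w := by simp
    have hget : cs[w.length]? = some '-' := by
      rw [hw]
      rw [List.getElem?_append_right le_rfl]
      simp
    refine ⟨⟨⟨⟨by omega, by omega⟩, hget⟩, by rw [htake]; exact hfree⟩, by rw [htake, hdrop]⟩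

lemma pvCountEq (cs : List Char) : PySem.Chars.count cs ['-'] = cs.count '-' := by
  simp only [PySem.Chars.count]
  rw [if_neg (by simp)]
  rw [pvCountGo cs cs.length 0 le_rfl]
  simp

lemma pvGoodCount (cs : List Char) (hg : pvGood cs) : cs.count '-' = 1 := by
  obtain ⟨w, hne, hfree, hw⟩ := hg
  rw [hw]
  simp [List.count_append, List.count_cons, List.count_eq_zero_of_not_mem hfree]

lemma pvUniq : ∀ (xs w ys z : List Char), '-' ∉ xs → '-' ∉ w →
    xs ++ '-' :: ys = w ++ '-' :: z → xs = w ∧ ys = z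
  | [], [], ys, z, _, _, h => by simpa using h
  | [], b :: u, ys, z, _, hw, h => by
      simp at h
      exact absurd (h.1 ▸ List.mem_cons_self) hw
  | a :: t, [], ys, z, hx, _, h => by
      simp at h
      exact absurd (h.1 ▸ List.mem_cons_self) hx
  | a :: t, b :: u, ys, z, hx, hw, h => by
      simp at h
      obtain ⟨hab, h2⟩ := h
      obtain ⟨h3, h4⟩ := pvUniq t u ys z (by simp at hx; tauto) (by simp at hw; tauto) h2
      exact ⟨by rw [hab, h3], h4⟩

lemma pvHead (s : String) (rest : List String) :
    is_all_same_word_twice (s :: rest) = (pvIsWordTwice s && is_all_same_word_twice rest) := by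
  have hsep : ("-" : String).toList = ['-'] := by decide
  have hcount : PySem.Str.count s "-" = s.toList.count '-' := by
    rw [PySem.Str.count_eq, hsep, pvCountEq]
  by_cases hc : s.toList.count '-' = 1
  · obtain ⟨xs, ys, hxy, hx, hy⟩ := pvDecomp s.toList hc
    have hsplitC : PySem.Chars.split? s.toList ['-'] = some [xs, ys] := by
      rw [PySem.Chars.split?]
      rw [if_neg (by simp)]
      rw [PySem.Chars.splitOn, hxy]
      rw [pvSplitGoHyphen xs ys _ [] [] (by simp) hx hy]
      simp
    have hmap := PySem.Str.split?_map s "-"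
    rw [hsep, hsplitC] at hmap
    obtain ⟨l, hl⟩ : ∃ l, PySem.Str.split? s "-" = some l := by
      cases hq : PySem.Str.split? s "-" with
      | none => rw [hq] at hmap; simp at hmap
      | some l => exact ⟨l, rfl⟩
    rw [hl] at hmap
    simp only [Option.map_some, Option.some.injEq] at hmap
    obtain ⟨b, a, rfl⟩ : ∃ b a, l = [b, a] := by
      cases l with
      | nil => simp at hmap
      | cons b t =>
        cases t with
        | nil => simp at hmap
        | cons a u =>
          cases u with
          | nil => exact ⟨b, a, rfl⟩
          | cons _ _ => simp at hmap
    simp only [List.map_cons, List.map_nil, List.cons.injEq, and_true] at hmap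
    obtain ⟨hb, ha⟩ := hmap
    rw [is_all_same_word_twice, if_neg (by rw [hcount]; simpa using hc), hl]
    by_cases hgood : xs = ys ∧ xs ≠ []
    · have hba : ¬ (b != a || b == "") = true := by
        simp [bne_iff_ne, beq_iff_eq, ← String.toList_inj, hb, ha]
        constructor
        · exact hgood.1
        · intro hbe
          exact hgood.2 hbe
      show (if (b != a || b == "") = true then false else is_all_same_word_twice rest)
            = (pvIsWordTwice s && is_all_same_word_twice rest)
      rw [if_neg hba]
      have : pvIsWordTwice s = true := by
        rw [pvAltIff]
        exact ⟨xs, hgood.2, hx, by rw [hxy, hgood.1]⟩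
      rw [this, Bool.true_and]
    · have : pvIsWordTwice s = false := by
        rw [← Bool.not_eq_true, pvAltIff]
        intro hg
        obtain ⟨w, hne, hfree, hw⟩ := hg
        obtain ⟨h1, h2⟩ := pvUniq xs w ys w hx hfree (hxy.symm.trans hw)
        exact hgood ⟨h1.trans h2.symm, by rw [h1]; exact fun e => hne e⟩
      have hba : (b != a || b == "") = true := by
        have hempty : ("" : String).toList = ([] : List Char) := by decide
        simp only [Bool.or_eq_true, bne_iff_ne, beq_iff_eq, ne_eq, ← String.toList_inj, hb, ha, hempty]
        by_cases h1 : xs = ys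
        · right; by_contra hne; exact hgood ⟨h1, hne⟩
        · left; exact h1
      show (if (b != a || b == "") = true then false else is_all_same_word_twice rest)
            = (pvIsWordTwice s && is_all_same_word_twice rest)
      rw [if_pos hba, this, Bool.false_and]
  · have hA : is_all_same_word_twice (s :: rest) = false := by
      rw [is_all_same_word_twice, if_pos (by rw [hcount]; simpa using hc)]
    have hB : pvIsWordTwice s = false := by
      rw [← Bool.not_eq_true, pvAltIff]
      exact fun hg => hc (pvGoodCount _ hg)
    rw [hA, hB, Bool.false_and]

lemma pvMain (strings : List String) :
    is_all_same_word_twice strings = is_all_same_word_twice_alt strings := by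
  induction strings with
  | nil => rfl
  | cons s rest ih =>
    rw [pvHead, ih]
    rfl

-- ===== VERDICT (by name: the statement is the Claim_ definition above) =====
theorem is_all_same_word_twice_spec : Claim_equal_is_all_same_word_twice := by
  intro strings _
  unfold Spec_is_all_same_word_twice
  exact pvMain strings
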